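-- pv_equiv track=rewrite | github.com/aws-neuron/neuronx-distributed-inference | contrib/models/HunyuanVideo-1.5/src/dit_tp_wrapper.py | build_weight_map
-- ===== SOURCE A (Python) =====
-- def build_weight_map(num_blocks=54):
--     """
--     Build a mapping from original HunyuanVideo DiT state_dict keys
--     to TP wrapper state_dict keys.
--
--     Original keys look like:
--       double_blocks.{i}.img_attn_q.weight  -> double_blocks.{i}.img_attn_q.weight
--       double_blocks.{i}.img_mod.linear.weight -> double_blocks.{i}.img_mod_linear.weight
--       double_blocks.{i}.img_mlp.fc1.weight -> double_blocks.{i}.img_mlp_fc1.weight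
--       double_blocks.{i}.img_mlp.fc2.weight -> double_blocks.{i}.img_mlp_fc2.weight
--       final_layer.norm_final.* -> norm_final.*
--       final_layer.linear.* -> linear.*
--       final_layer.adaLN_modulation.* -> adaLN_modulation.*
--
--     Returns dict: original_key -> tp_wrapper_key
--     """
--     weight_map = {}
--
--     for i in range(num_blocks):
--         prefix = f"double_blocks.{i}"
--
--         for stream in ["img", "txt"]:
--             # Modulation: mod.linear -> mod_linear, mod.act -> mod_act (no params)
--             weight_map[f"{prefix}.{stream}_mod.linear.weight"] = (
--                 f"{prefix}.{stream}_mod_linear.weight"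
--             )
--             weight_map[f"{prefix}.{stream}_mod.linear.bias"] = (
--                 f"{prefix}.{stream}_mod_linear.bias"
--             )
--
--             # QKV (direct mapping -- same names)
--             for proj in ["attn_q", "attn_k", "attn_v"]:
--                 weight_map[f"{prefix}.{stream}_{proj}.weight"] = (
--                     f"{prefix}.{stream}_{proj}.weight"
--                 )
--                 weight_map[f"{prefix}.{stream}_{proj}.bias"] = (
--                     f"{prefix}.{stream}_{proj}.bias"
--                 )
--
--             # QK-norm (direct mapping)
--             for norm in ["attn_q_norm", "attn_k_norm"]:
--                 weight_map[f"{prefix}.{stream}_{norm}.weight"] = (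
--                     f"{prefix}.{stream}_{norm}.weight"
--                 )
--
--             # O projection (direct mapping)
--             weight_map[f"{prefix}.{stream}_attn_proj.weight"] = (
--                 f"{prefix}.{stream}_attn_proj.weight"
--             )
--             weight_map[f"{prefix}.{stream}_attn_proj.bias"] = (
--                 f"{prefix}.{stream}_attn_proj.bias"
--             )
--
--             # Norms (direct mapping)
--             # img_norm1, img_norm2 have no affine params (elementwise_affine=False)
--
--             # MLP: mlp.fc1 -> mlp_fc1, mlp.fc2 -> mlp_fc2
--             weight_map[f"{prefix}.{stream}_mlp.fc1.weight"] = (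
--                 f"{prefix}.{stream}_mlp_fc1.weight"
--             )
--             weight_map[f"{prefix}.{stream}_mlp.fc1.bias"] = (
--                 f"{prefix}.{stream}_mlp_fc1.bias"
--             )
--             weight_map[f"{prefix}.{stream}_mlp.fc2.weight"] = (
--                 f"{prefix}.{stream}_mlp_fc2.weight"
--             )
--             weight_map[f"{prefix}.{stream}_mlp.fc2.bias"] = (
--                 f"{prefix}.{stream}_mlp_fc2.bias"
--             )
--
--     # Final layer (norm_final has elementwise_affine=False, no weight/bias)
--     weight_map["final_layer.linear.weight"] = "linear.weight"
--     weight_map["final_layer.linear.bias"] = "linear.bias"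
--     weight_map["final_layer.adaLN_modulation.1.weight"] = "adaLN_modulation.1.weight"
--     weight_map["final_layer.adaLN_modulation.1.bias"] = "adaLN_modulation.1.bias"
--
--     return weight_map
-- ===== SOURCE B (Python) =====
-- # One block's mapping written once as a literal placeholder template; each block is
-- # produced by substituting the block index into the template text.
-- _BLOCK_TEMPLATE = [
--     ("double_blocks.{i}.img_mod.linear.weight", "double_blocks.{i}.img_mod_linear.weight"),
--     ("double_blocks.{i}.img_mod.linear.bias", "double_blocks.{i}.img_mod_linear.bias"),
--     ("double_blocks.{i}.img_attn_q.weight", "double_blocks.{i}.img_attn_q.weight"),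
--     ("double_blocks.{i}.img_attn_q.bias", "double_blocks.{i}.img_attn_q.bias"),
--     ("double_blocks.{i}.img_attn_k.weight", "double_blocks.{i}.img_attn_k.weight"),
--     ("double_blocks.{i}.img_attn_k.bias", "double_blocks.{i}.img_attn_k.bias"),
--     ("double_blocks.{i}.img_attn_v.weight", "double_blocks.{i}.img_attn_v.weight"),
--     ("double_blocks.{i}.img_attn_v.bias", "double_blocks.{i}.img_attn_v.bias"),
--     ("double_blocks.{i}.img_attn_q_norm.weight", "double_blocks.{i}.img_attn_q_norm.weight"),
--     ("double_blocks.{i}.img_attn_k_norm.weight", "double_blocks.{i}.img_attn_k_norm.weight"),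
--     ("double_blocks.{i}.img_attn_proj.weight", "double_blocks.{i}.img_attn_proj.weight"),
--     ("double_blocks.{i}.img_attn_proj.bias", "double_blocks.{i}.img_attn_proj.bias"),
--     ("double_blocks.{i}.img_mlp.fc1.weight", "double_blocks.{i}.img_mlp_fc1.weight"),
--     ("double_blocks.{i}.img_mlp.fc1.bias", "double_blocks.{i}.img_mlp_fc1.bias"),
--     ("double_blocks.{i}.img_mlp.fc2.weight", "double_blocks.{i}.img_mlp_fc2.weight"),
--     ("double_blocks.{i}.img_mlp.fc2.bias", "double_blocks.{i}.img_mlp_fc2.bias"),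
--     ("double_blocks.{i}.txt_mod.linear.weight", "double_blocks.{i}.txt_mod_linear.weight"),
--     ("double_blocks.{i}.txt_mod.linear.bias", "double_blocks.{i}.txt_mod_linear.bias"),
--     ("double_blocks.{i}.txt_attn_q.weight", "double_blocks.{i}.txt_attn_q.weight"),
--     ("double_blocks.{i}.txt_attn_q.bias", "double_blocks.{i}.txt_attn_q.bias"),
--     ("double_blocks.{i}.txt_attn_k.weight", "double_blocks.{i}.txt_attn_k.weight"),
--     ("double_blocks.{i}.txt_attn_k.bias", "double_blocks.{i}.txt_attn_k.bias"),
--     ("double_blocks.{i}.txt_attn_v.weight", "double_blocks.{i}.txt_attn_v.weight"),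
--     ("double_blocks.{i}.txt_attn_v.bias", "double_blocks.{i}.txt_attn_v.bias"),
--     ("double_blocks.{i}.txt_attn_q_norm.weight", "double_blocks.{i}.txt_attn_q_norm.weight"),
--     ("double_blocks.{i}.txt_attn_k_norm.weight", "double_blocks.{i}.txt_attn_k_norm.weight"),
--     ("double_blocks.{i}.txt_attn_proj.weight", "double_blocks.{i}.txt_attn_proj.weight"),
--     ("double_blocks.{i}.txt_attn_proj.bias", "double_blocks.{i}.txt_attn_proj.bias"),
--     ("double_blocks.{i}.txt_mlp.fc1.weight", "double_blocks.{i}.txt_mlp_fc1.weight"),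
--     ("double_blocks.{i}.txt_mlp.fc1.bias", "double_blocks.{i}.txt_mlp_fc1.bias"),
--     ("double_blocks.{i}.txt_mlp.fc2.weight", "double_blocks.{i}.txt_mlp_fc2.weight"),
--     ("double_blocks.{i}.txt_mlp.fc2.bias", "double_blocks.{i}.txt_mlp_fc2.bias"),
-- ]
--
-- _FINAL_PAIRS = [
--     ("final_layer.linear.weight", "linear.weight"),
--     ("final_layer.linear.bias", "linear.bias"),
--     ("final_layer.adaLN_modulation.1.weight", "adaLN_modulation.1.weight"),
--     ("final_layer.adaLN_modulation.1.bias", "adaLN_modulation.1.bias"),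
-- ]
--
--
-- def build_weight_map(num_blocks=54):
--     out = {}
--     for i in range(num_blocks):
--         s = str(i)
--         for k, v in _BLOCK_TEMPLATE:
--             out[k.replace("{i}", s)] = v.replace("{i}", s)
--     out.update(_FINAL_PAIRS)
--     return out
-- ===== Notes on version B (the rewrite author's own statement) =====
-- stated objective: alternative
-- what changed: Replaces A's nested stream/component loops of hand-written f-string dict assignments by a literal one-block placeholder template ('{i}' in the text) instantiated per block by pure string substitution, with the final-layer keys kept as literal data merged via dict.update.
import Mathlib
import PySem

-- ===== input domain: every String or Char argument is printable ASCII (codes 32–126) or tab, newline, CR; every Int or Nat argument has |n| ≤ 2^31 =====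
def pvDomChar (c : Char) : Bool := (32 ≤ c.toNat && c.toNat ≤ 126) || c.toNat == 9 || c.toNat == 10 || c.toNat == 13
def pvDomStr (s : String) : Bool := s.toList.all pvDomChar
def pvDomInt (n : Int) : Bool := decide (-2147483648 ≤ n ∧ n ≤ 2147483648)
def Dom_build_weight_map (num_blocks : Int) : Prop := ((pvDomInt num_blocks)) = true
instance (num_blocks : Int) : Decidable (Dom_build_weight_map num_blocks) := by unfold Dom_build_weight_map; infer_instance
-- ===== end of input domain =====

-- B replaces A's nested stream/component loops of literal f-string assignments by a
-- literal one-block placeholder template instantiated per block via string substitution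
-- (objective: alternative).

-- ===== PORT A =====
-- one iteration of A's `for i in range(num_blocks)` loop body (the two-stream loop with its inner proj/norm loops)
def pvBlockStep (wm : PySem.Dict String String) (i : Int) : PySem.Dict String String :=
  let pfx := "double_blocks." ++ PySem.Int.toStr i
  ["img", "txt"].foldl (fun wm stream =>
    let wm := wm.insert (pfx ++ "." ++ stream ++ "_mod.linear.weight") (pfx ++ "." ++ stream ++ "_mod_linear.weight")
    let wm := wm.insert (pfx ++ "." ++ stream ++ "_mod.linear.bias") (pfx ++ "." ++ stream ++ "_mod_linear.bias")
    let wm := ["attn_q", "attn_k", "attn_v"].foldl (fun wm proj =>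
      let wm := wm.insert (pfx ++ "." ++ stream ++ "_" ++ proj ++ ".weight") (pfx ++ "." ++ stream ++ "_" ++ proj ++ ".weight")
      wm.insert (pfx ++ "." ++ stream ++ "_" ++ proj ++ ".bias") (pfx ++ "." ++ stream ++ "_" ++ proj ++ ".bias")) wm
    let wm := ["attn_q_norm", "attn_k_norm"].foldl (fun wm norm =>
      wm.insert (pfx ++ "." ++ stream ++ "_" ++ norm ++ ".weight") (pfx ++ "." ++ stream ++ "_" ++ norm ++ ".weight")) wm
    let wm := wm.insert (pfx ++ "." ++ stream ++ "_attn_proj.weight") (pfx ++ "." ++ stream ++ "_attn_proj.weight")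
    let wm := wm.insert (pfx ++ "." ++ stream ++ "_attn_proj.bias") (pfx ++ "." ++ stream ++ "_attn_proj.bias")
    let wm := wm.insert (pfx ++ "." ++ stream ++ "_mlp.fc1.weight") (pfx ++ "." ++ stream ++ "_mlp_fc1.weight")
    let wm := wm.insert (pfx ++ "." ++ stream ++ "_mlp.fc1.bias") (pfx ++ "." ++ stream ++ "_mlp_fc1.bias")
    let wm := wm.insert (pfx ++ "." ++ stream ++ "_mlp.fc2.weight") (pfx ++ "." ++ stream ++ "_mlp_fc2.weight")
    wm.insert (pfx ++ "." ++ stream ++ "_mlp.fc2.bias") (pfx ++ "." ++ stream ++ "_mlp_fc2.bias")) wm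

def build_weight_map (num_blocks : Int) : List (String × String) :=
  let wm : PySem.Dict String String := PySem.Dict.empty
  let wm := (PySem.List.pyRange 0 num_blocks 1).foldl pvBlockStep wm
  let wm := wm.insert "final_layer.linear.weight" "linear.weight"
  let wm := wm.insert "final_layer.linear.bias" "linear.bias"
  let wm := wm.insert "final_layer.adaLN_modulation.1.weight" "adaLN_modulation.1.weight"
  let wm := wm.insert "final_layer.adaLN_modulation.1.bias" "adaLN_modulation.1.bias"
  wm.items

-- ===== PORT B =====
def pvBlockTemplate : List (String × String) :=
  [("double_blocks.{i}.img_mod.linear.weight", "double_blocks.{i}.img_mod_linear.weight"),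
   ("double_blocks.{i}.img_mod.linear.bias", "double_blocks.{i}.img_mod_linear.bias"),
   ("double_blocks.{i}.img_attn_q.weight", "double_blocks.{i}.img_attn_q.weight"),
   ("double_blocks.{i}.img_attn_q.bias", "double_blocks.{i}.img_attn_q.bias"),
   ("double_blocks.{i}.img_attn_k.weight", "double_blocks.{i}.img_attn_k.weight"),
   ("double_blocks.{i}.img_attn_k.bias", "double_blocks.{i}.img_attn_k.bias"),
   ("double_blocks.{i}.img_attn_v.weight", "double_blocks.{i}.img_attn_v.weight"),
   ("double_blocks.{i}.img_attn_v.bias", "double_blocks.{i}.img_attn_v.bias"),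
   ("double_blocks.{i}.img_attn_q_norm.weight", "double_blocks.{i}.img_attn_q_norm.weight"),
   ("double_blocks.{i}.img_attn_k_norm.weight", "double_blocks.{i}.img_attn_k_norm.weight"),
   ("double_blocks.{i}.img_attn_proj.weight", "double_blocks.{i}.img_attn_proj.weight"),
   ("double_blocks.{i}.img_attn_proj.bias", "double_blocks.{i}.img_attn_proj.bias"),
   ("double_blocks.{i}.img_mlp.fc1.weight", "double_blocks.{i}.img_mlp_fc1.weight"),
   ("double_blocks.{i}.img_mlp.fc1.bias", "double_blocks.{i}.img_mlp_fc1.bias"),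
   ("double_blocks.{i}.img_mlp.fc2.weight", "double_blocks.{i}.img_mlp_fc2.weight"),
   ("double_blocks.{i}.img_mlp.fc2.bias", "double_blocks.{i}.img_mlp_fc2.bias"),
   ("double_blocks.{i}.txt_mod.linear.weight", "double_blocks.{i}.txt_mod_linear.weight"),
   ("double_blocks.{i}.txt_mod.linear.bias", "double_blocks.{i}.txt_mod_linear.bias"),
   ("double_blocks.{i}.txt_attn_q.weight", "double_blocks.{i}.txt_attn_q.weight"),
   ("double_blocks.{i}.txt_attn_q.bias", "double_blocks.{i}.txt_attn_q.bias"),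
   ("double_blocks.{i}.txt_attn_k.weight", "double_blocks.{i}.txt_attn_k.weight"),
   ("double_blocks.{i}.txt_attn_k.bias", "double_blocks.{i}.txt_attn_k.bias"),
   ("double_blocks.{i}.txt_attn_v.weight", "double_blocks.{i}.txt_attn_v.weight"),
   ("double_blocks.{i}.txt_attn_v.bias", "double_blocks.{i}.txt_attn_v.bias"),
   ("double_blocks.{i}.txt_attn_q_norm.weight", "double_blocks.{i}.txt_attn_q_norm.weight"),
   ("double_blocks.{i}.txt_attn_k_norm.weight", "double_blocks.{i}.txt_attn_k_norm.weight"),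
   ("double_blocks.{i}.txt_attn_proj.weight", "double_blocks.{i}.txt_attn_proj.weight"),
   ("double_blocks.{i}.txt_attn_proj.bias", "double_blocks.{i}.txt_attn_proj.bias"),
   ("double_blocks.{i}.txt_mlp.fc1.weight", "double_blocks.{i}.txt_mlp_fc1.weight"),
   ("double_blocks.{i}.txt_mlp.fc1.bias", "double_blocks.{i}.txt_mlp_fc1.bias"),
   ("double_blocks.{i}.txt_mlp.fc2.weight", "double_blocks.{i}.txt_mlp_fc2.weight"),
   ("double_blocks.{i}.txt_mlp.fc2.bias", "double_blocks.{i}.txt_mlp_fc2.bias")]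

def pvFinalPairs : List (String × String) :=
  [("final_layer.linear.weight", "linear.weight"),
   ("final_layer.linear.bias", "linear.bias"),
   ("final_layer.adaLN_modulation.1.weight", "adaLN_modulation.1.weight"),
   ("final_layer.adaLN_modulation.1.bias", "adaLN_modulation.1.bias")]

def build_weight_map_alt (num_blocks : Int) : List (String × String) :=
  let out : PySem.Dict String String := PySem.Dict.empty
  let out := (PySem.List.pyRange 0 num_blocks 1).foldl (fun out i =>
    let s := PySem.Int.toStr i
    pvBlockTemplate.foldl (fun (out : PySem.Dict String String) p =>
      out.insert (PySem.Str.replace p.1 "{i}" s) (PySem.Str.replace p.2 "{i}" s)) out) out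
  -- out.update(_FINAL_PAIRS): insert each pair in order
  let out := pvFinalPairs.foldl (fun (out : PySem.Dict String String) p => out.insert p.1 p.2) out
  out.items

-- ===== PRECONDITION & SPEC =====
def Spec_build_weight_map (num_blocks : Int) (out : List (String × String)) : Prop := out = build_weight_map_alt num_blocks
instance (num_blocks : Int) (out : List (String × String)) : Decidable (Spec_build_weight_map num_blocks out) := by unfold Spec_build_weight_map; infer_instance

-- ===== CLAIM (what is proved, stated in full; the proofs are below) =====
def Claim_equal_build_weight_map : Prop := ∀ (num_blocks : Int), Dom_build_weight_map num_blocks → Spec_build_weight_map num_blocks (build_weight_map num_blocks)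

-- ===== LEMMAS AND PROOFS =====

-- PySem.Chars.replace.go on a pattern-free list is the identity scan
theorem pvGoNoBrace (new : List Char) : ∀ (fuel : Nat) (l acc : List Char), '{' ∉ l →
    PySem.Chars.replace.go ['{','i','}'] new fuel l acc = acc.reverse ++ l := by
  intro fuel
  induction fuel with
  | zero => intro l acc _; rw [PySem.Chars.replace.go.eq_def]
  | succ f ih =>
    intro l acc h
    cases l with
    | nil => rw [PySem.Chars.replace.go.eq_def]; simp
    | cons c t =>
      have hc : c ≠ '{' := fun e => h (e ▸ List.mem_cons_self ..)
      have hpf : (['{','i','}'].isPrefixOf (c :: t)) = false := by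
        simp [List.isPrefixOf]; intro e; exact absurd e.symm hc
      rw [PySem.Chars.replace.go.eq_def]
      simp only [hpf, Bool.false_eq_true, if_false]
      rw [ih t (c :: acc) (fun m => h (List.mem_cons_of_mem _ m))]
      simp

-- a single pattern occurrence between pattern-free halves is substituted once
theorem pvGoOnce (new : List Char) : ∀ (a : List Char) (b : List Char) (fuel : Nat) (acc : List Char),
    '{' ∉ a → '{' ∉ b → a.length < fuel →
    PySem.Chars.replace.go ['{','i','}'] new fuel (a ++ '{' :: 'i' :: '}' :: b) acc
      = acc.reverse ++ a ++ new ++ b := by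
  intro a
  induction a with
  | nil =>
    intro b fuel acc _ hb hf
    cases fuel with
    | zero => omega
    | succ f =>
      have hpf : (['{','i','}'].isPrefixOf ('{' :: 'i' :: '}' :: b)) = true := by
        simp [List.isPrefixOf]
      rw [PySem.Chars.replace.go.eq_def]
      simp only [List.nil_append, hpf, if_true]
      rw [show List.drop (['{','i','}'] : List Char).length ('{' :: 'i' :: '}' :: b) = b from rfl]
      rw [pvGoNoBrace new f b _ hb]
      simp
  | cons c a' ih =>
    intro b fuel acc ha hb hf
    cases fuel with
    | zero => simp at hf
    | succ f =>
      have hc : c ≠ '{' := fun e => ha (e ▸ List.mem_cons_self ..)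
      have hpf : (['{','i','}'].isPrefixOf (c :: (a' ++ '{' :: 'i' :: '}' :: b))) = false := by
        simp [List.isPrefixOf]; intro e; exact absurd e.symm hc
      rw [PySem.Chars.replace.go.eq_def]
      simp only [List.cons_append, hpf, Bool.false_eq_true, if_false]
      rw [ih b f (c :: acc) (fun m => ha (List.mem_cons_of_mem _ m)) hb (by simp at hf ⊢; omega)]
      simp

theorem pvInst (pre suf t : String) (hpre : '{' ∉ pre.toList) (hsuf : '{' ∉ suf.toList) :
    PySem.Str.replace (pre ++ "{i}" ++ suf) "{i}" t = pre ++ t ++ suf := by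
  unfold PySem.Str.replace PySem.Chars.replace
  have h1 : ("{i}" : String).toList = ['{','i','}'] := by decide
  rw [h1]
  rw [if_neg (by decide)]
  have h2 : (pre ++ "{i}" ++ suf).toList = pre.toList ++ '{' :: 'i' :: '}' :: suf.toList := by
    simp [h1]
  rw [h2, pvGoOnce t.toList pre.toList suf.toList _ [] hpre hsuf (by simp only [List.length_append, List.length_cons]; omega)]
  simp [String.append_assoc]

theorem pvInstEq (s pre suf t : String) (h : s = pre ++ "{i}" ++ suf)
    (hpre : '{' ∉ pre.toList) (hsuf : '{' ∉ suf.toList) :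
    PySem.Str.replace s "{i}" t = pre ++ t ++ suf := by
  rw [h]; exact pvInst pre suf t hpre hsuf

-- one instantiated template block, folded into the dict, is exactly A's loop-body step
theorem pvBlock_eq (d : PySem.Dict String String) (i : Int) :
    pvBlockTemplate.foldl (fun (acc : PySem.Dict String String) p =>
      acc.insert (PySem.Str.replace p.1 "{i}" (PySem.Int.toStr i))
                 (PySem.Str.replace p.2 "{i}" (PySem.Int.toStr i))) d = pvBlockStep d i := by
  have k00 := pvInstEq "double_blocks.{i}.img_mod.linear.weight" "double_blocks." ".img_mod.linear.weight" (PySem.Int.toStr i) (by decide) (by decide) (by decide)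
  have k01 := pvInstEq "double_blocks.{i}.img_mod_linear.weight" "double_blocks." ".img_mod_linear.weight" (PySem.Int.toStr i) (by decide) (by decide) (by decide)
  have k02 := pvInstEq "double_blocks.{i}.img_mod.linear.bias" "double_blocks." ".img_mod.linear.bias" (PySem.Int.toStr i) (by decide) (by decide) (by decide)
  have k03 := pvInstEq "double_blocks.{i}.img_mod_linear.bias" "double_blocks." ".img_mod_linear.bias" (PySem.Int.toStr i) (by decide) (by decide) (by decide)
  have k04 := pvInstEq "double_blocks.{i}.img_attn_q.weight" "double_blocks." ".img_attn_q.weight" (PySem.Int.toStr i) (by decide) (by decide) (by decide)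
  have k05 := pvInstEq "double_blocks.{i}.img_attn_q.bias" "double_blocks." ".img_attn_q.bias" (PySem.Int.toStr i) (by decide) (by decide) (by decide)
  have k06 := pvInstEq "double_blocks.{i}.img_attn_k.weight" "double_blocks." ".img_attn_k.weight" (PySem.Int.toStr i) (by decide) (by decide) (by decide)
  have k07 := pvInstEq "double_blocks.{i}.img_attn_k.bias" "double_blocks." ".img_attn_k.bias" (PySem.Int.toStr i) (by decide) (by decide) (by decide)
  have k08 := pvInstEq "double_blocks.{i}.img_attn_v.weight" "double_blocks." ".img_attn_v.weight" (PySem.Int.toStr i) (by decide) (by decide) (by decide)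
  have k09 := pvInstEq "double_blocks.{i}.img_attn_v.bias" "double_blocks." ".img_attn_v.bias" (PySem.Int.toStr i) (by decide) (by decide) (by decide)
  have k10 := pvInstEq "double_blocks.{i}.img_attn_q_norm.weight" "double_blocks." ".img_attn_q_norm.weight" (PySem.Int.toStr i) (by decide) (by decide) (by decide)
  have k11 := pvInstEq "double_blocks.{i}.img_attn_k_norm.weight" "double_blocks." ".img_attn_k_norm.weight" (PySem.Int.toStr i) (by decide) (by decide) (by decide)
  have k12 := pvInstEq "double_blocks.{i}.img_attn_proj.weight" "double_blocks." ".img_attn_proj.weight" (PySem.Int.toStr i) (by decide) (by decide) (by decide)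
  have k13 := pvInstEq "double_blocks.{i}.img_attn_proj.bias" "double_blocks." ".img_attn_proj.bias" (PySem.Int.toStr i) (by decide) (by decide) (by decide)
  have k14 := pvInstEq "double_blocks.{i}.img_mlp.fc1.weight" "double_blocks." ".img_mlp.fc1.weight" (PySem.Int.toStr i) (by decide) (by decide) (by decide)
  have k15 := pvInstEq "double_blocks.{i}.img_mlp_fc1.weight" "double_blocks." ".img_mlp_fc1.weight" (PySem.Int.toStr i) (by decide) (by decide) (by decide)
  have k16 := pvInstEq "double_blocks.{i}.img_mlp.fc1.bias" "double_blocks." ".img_mlp.fc1.bias" (PySem.Int.toStr i) (by decide) (by decide) (by decide)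
  have k17 := pvInstEq "double_blocks.{i}.img_mlp_fc1.bias" "double_blocks." ".img_mlp_fc1.bias" (PySem.Int.toStr i) (by decide) (by decide) (by decide)
  have k18 := pvInstEq "double_blocks.{i}.img_mlp.fc2.weight" "double_blocks." ".img_mlp.fc2.weight" (PySem.Int.toStr i) (by decide) (by decide) (by decide)
  have k19 := pvInstEq "double_blocks.{i}.img_mlp_fc2.weight" "double_blocks." ".img_mlp_fc2.weight" (PySem.Int.toStr i) (by decide) (by decide) (by decide)
  have k20 := pvInstEq "double_blocks.{i}.img_mlp.fc2.bias" "double_blocks." ".img_mlp.fc2.bias" (PySem.Int.toStr i) (by decide) (by decide) (by decide)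
  have k21 := pvInstEq "double_blocks.{i}.img_mlp_fc2.bias" "double_blocks." ".img_mlp_fc2.bias" (PySem.Int.toStr i) (by decide) (by decide) (by decide)
  have k22 := pvInstEq "double_blocks.{i}.txt_mod.linear.weight" "double_blocks." ".txt_mod.linear.weight" (PySem.Int.toStr i) (by decide) (by decide) (by decide)
  have k23 := pvInstEq "double_blocks.{i}.txt_mod_linear.weight" "double_blocks." ".txt_mod_linear.weight" (PySem.Int.toStr i) (by decide) (by decide) (by decide)
  have k24 := pvInstEq "double_blocks.{i}.txt_mod.linear.bias" "double_blocks." ".txt_mod.linear.bias" (PySem.Int.toStr i) (by decide) (by decide) (by decide)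
  have k25 := pvInstEq "double_blocks.{i}.txt_mod_linear.bias" "double_blocks." ".txt_mod_linear.bias" (PySem.Int.toStr i) (by decide) (by decide) (by decide)
  have k26 := pvInstEq "double_blocks.{i}.txt_attn_q.weight" "double_blocks." ".txt_attn_q.weight" (PySem.Int.toStr i) (by decide) (by decide) (by decide)
  have k27 := pvInstEq "double_blocks.{i}.txt_attn_q.bias" "double_blocks." ".txt_attn_q.bias" (PySem.Int.toStr i) (by decide) (by decide) (by decide)
  have k28 := pvInstEq "double_blocks.{i}.txt_attn_k.weight" "double_blocks." ".txt_attn_k.weight" (PySem.Int.toStr i) (by decide) (by decide) (by decide)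
  have k29 := pvInstEq "double_blocks.{i}.txt_attn_k.bias" "double_blocks." ".txt_attn_k.bias" (PySem.Int.toStr i) (by decide) (by decide) (by decide)
  have k30 := pvInstEq "double_blocks.{i}.txt_attn_v.weight" "double_blocks." ".txt_attn_v.weight" (PySem.Int.toStr i) (by decide) (by decide) (by decide)
  have k31 := pvInstEq "double_blocks.{i}.txt_attn_v.bias" "double_blocks." ".txt_attn_v.bias" (PySem.Int.toStr i) (by decide) (by decide) (by decide)
  have k32 := pvInstEq "double_blocks.{i}.txt_attn_q_norm.weight" "double_blocks." ".txt_attn_q_norm.weight" (PySem.Int.toStr i) (by decide) (by decide) (by decide)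
  have k33 := pvInstEq "double_blocks.{i}.txt_attn_k_norm.weight" "double_blocks." ".txt_attn_k_norm.weight" (PySem.Int.toStr i) (by decide) (by decide) (by decide)
  have k34 := pvInstEq "double_blocks.{i}.txt_attn_proj.weight" "double_blocks." ".txt_attn_proj.weight" (PySem.Int.toStr i) (by decide) (by decide) (by decide)
  have k35 := pvInstEq "double_blocks.{i}.txt_attn_proj.bias" "double_blocks." ".txt_attn_proj.bias" (PySem.Int.toStr i) (by decide) (by decide) (by decide)
  have k36 := pvInstEq "double_blocks.{i}.txt_mlp.fc1.weight" "double_blocks." ".txt_mlp.fc1.weight" (PySem.Int.toStr i) (by decide) (by decide) (by decide)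
  have k37 := pvInstEq "double_blocks.{i}.txt_mlp_fc1.weight" "double_blocks." ".txt_mlp_fc1.weight" (PySem.Int.toStr i) (by decide) (by decide) (by decide)
  have k38 := pvInstEq "double_blocks.{i}.txt_mlp.fc1.bias" "double_blocks." ".txt_mlp.fc1.bias" (PySem.Int.toStr i) (by decide) (by decide) (by decide)
  have k39 := pvInstEq "double_blocks.{i}.txt_mlp_fc1.bias" "double_blocks." ".txt_mlp_fc1.bias" (PySem.Int.toStr i) (by decide) (by decide) (by decide)
  have k40 := pvInstEq "double_blocks.{i}.txt_mlp.fc2.weight" "double_blocks." ".txt_mlp.fc2.weight" (PySem.Int.toStr i) (by decide) (by decide) (by decide)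
  have k41 := pvInstEq "double_blocks.{i}.txt_mlp_fc2.weight" "double_blocks." ".txt_mlp_fc2.weight" (PySem.Int.toStr i) (by decide) (by decide) (by decide)
  have k42 := pvInstEq "double_blocks.{i}.txt_mlp.fc2.bias" "double_blocks." ".txt_mlp.fc2.bias" (PySem.Int.toStr i) (by decide) (by decide) (by decide)
  have k43 := pvInstEq "double_blocks.{i}.txt_mlp_fc2.bias" "double_blocks." ".txt_mlp_fc2.bias" (PySem.Int.toStr i) (by decide) (by decide) (by decide)
  simp only [pvBlockTemplate, pvBlockStep, List.foldl,
    k00, k01, k02, k03, k04, k05, k06, k07, k08, k09, k10, k11, k12, k13, k14, k15, k16, k17, k18, k19, k20, k21, k22, k23, k24, k25, k26, k27, k28, k29, k30, k31, k32, k33, k34, k35, k36, k37, k38, k39, k40, k41, k42, k43]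
  generalize PySem.Int.toStr i = t
  simp [String.append_assoc]

theorem build_weight_map_eq (num_blocks : Int) :
    build_weight_map num_blocks = build_weight_map_alt num_blocks := by
  unfold build_weight_map build_weight_map_alt
  simp only [pvBlock_eq]
  simp [pvFinalPairs]

-- ===== VERDICT (by name: the statement is the Claim_ definition above) =====
theorem build_weight_map_spec : Claim_equal_build_weight_map := by
  intro n _
  unfold Spec_build_weight_map
  exact build_weight_map_eq n
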